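-- pv_equiv track=rewrite | github.com/pypi-data/pypi-mirror-403 | packages/titan-cli/titan_cli-0.1.5-py3-none-any.whl/titan_plugin_jira/agents/response_parser.py | _parse_subtasks_regex
-- ===== SOURCE A (Python) =====
-- from typing import Dict, Any, List, Optional, Callable
--
-- def _parse_subtasks_regex(content: str) -> List[Dict[str, str]]:
--     """Fallback regex parser for subtasks in text format."""
--     subtasks = []
--     current_subtask = None
--
--     for line in content.split("\n"):
--         line = line.strip()
--
--         if line.startswith("SUBTASK_"):
--             if current_subtask:
--                 subtasks.append(current_subtask)
--             current_subtask = {"summary": "", "description": ""}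
--         elif current_subtask:
--             if line.startswith("Summary:"):
--                 current_subtask["summary"] = line.split(":", 1)[1].strip()
--             elif line.startswith("Description:"):
--                 current_subtask["description"] = line.split(":", 1)[1].strip()
--
--     if current_subtask:
--         subtasks.append(current_subtask)
--
--     return subtasks
-- ===== SOURCE B (Python) =====
-- def _parse_subtasks_regex(content):
--     """Group-then-parse: split stripped lines into one block per SUBTASK_ marker, then map each block to its dict."""
--     lines = [l.strip() for l in content.split("\n")]
--     blocks = []
--     i, n = 0, len(lines)
--     while i < n and not lines[i].startswith("SUBTASK_"):
--         i += 1
--     while i < n: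
--         j = i + 1
--         while j < n and not lines[j].startswith("SUBTASK_"):
--             j += 1
--         blocks.append(lines[i + 1:j])
--         i = j
--
--     def parse_block(block):
--         d = {"summary": "", "description": ""}
--         for line in block:
--             if line.startswith("Summary:"):
--                 d["summary"] = line.split(":", 1)[1].strip()
--             elif line.startswith("Description:"):
--                 d["description"] = line.split(":", 1)[1].strip()
--         return d
--
--     return [parse_block(b) for b in blocks]
-- ===== Notes on version B (the rewrite author's own statement) =====
-- stated objective: alternative
-- what changed: Replaces A's single-pass accumulator-and-flush loop (current_subtask carried through the scan) by a two-phase group-then-parse decomposition: first cut the stripped lines into one block per SUBTASK_ marker, then map each block independently to its field dict.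
import Mathlib
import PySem

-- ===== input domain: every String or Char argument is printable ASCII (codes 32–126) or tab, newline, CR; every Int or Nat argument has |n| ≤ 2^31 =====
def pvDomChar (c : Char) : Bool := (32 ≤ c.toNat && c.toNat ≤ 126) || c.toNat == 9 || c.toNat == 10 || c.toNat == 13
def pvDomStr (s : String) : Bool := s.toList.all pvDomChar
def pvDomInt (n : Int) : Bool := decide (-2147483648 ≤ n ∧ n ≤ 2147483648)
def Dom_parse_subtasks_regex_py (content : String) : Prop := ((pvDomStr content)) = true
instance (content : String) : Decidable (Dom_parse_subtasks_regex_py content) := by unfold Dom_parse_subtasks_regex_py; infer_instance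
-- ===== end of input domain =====

-- B replaces A's single-pass accumulator/flush loop by a group-first-then-parse decomposition (objective: alternative, same cost).

-- ===== PORT A =====
-- line.split(":", 1)[1].strip(); the [1] is total via getD "" — unreachable fallback, since the line starts with "Summary:"/"Description:" the split has ≥ 2 parts
def pvFieldA (line : String) : String :=
  PySem.Str.strip (((PySem.Str.splitMax? line ":" 1).getD []).getD 1 "")

def pvStepA (st : List (PySem.Dict String String) × Option (PySem.Dict String String))
    (rawline : String) : List (PySem.Dict String String) × Option (PySem.Dict String String) :=
  let line := PySem.Str.strip rawline
  if PySem.Str.startswith line "SUBTASK_" then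
    match st.2 with
    | some d => (st.1 ++ [d], some (PySem.Dict.ofList [("summary", ""), ("description", "")]))
    | none => (st.1, some (PySem.Dict.ofList [("summary", ""), ("description", "")]))
  else
    match st.2 with
    | some d =>
      if PySem.Str.startswith line "Summary:" then (st.1, some (d.insert "summary" (pvFieldA line)))
      else if PySem.Str.startswith line "Description:" then (st.1, some (d.insert "description" (pvFieldA line)))
      else st
    | none => st

def parse_subtasks_regex_py (content : String) : List (List (String × String)) :=
  let r := (((PySem.Str.split? content "\n").getD [])).foldl pvStepA ([], none)  -- split? is some: sep ≠ ""
  (match r.2 with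
   | some d => r.1 ++ [d]
   | none => r.1).map (fun d => PySem.Dict.items d)

-- ===== PORT B =====
def pvFieldB (line : String) : String :=
  PySem.Str.strip (((PySem.Str.splitMax? line ":" 1).getD []).getD 1 "")

def pvIsMarker (l : String) : Bool := PySem.Str.startswith l "SUBTASK_"

-- the two index loops of Source B: skip to the first marker, then cut one block per marker
def pvBlocks : List String → List (List String)
  | [] => []
  | l :: ls =>
    if pvIsMarker l then
      (ls.takeWhile (fun x => !pvIsMarker x)) :: pvBlocks (ls.dropWhile (fun x => !pvIsMarker x))
    else pvBlocks ls
termination_by ls => ls.length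
decreasing_by
  · exact Nat.lt_succ_of_le (List.length_dropWhile_le _ _)
  · exact Nat.lt_succ_self _

def pvParseBlock (b : List String) : PySem.Dict String String :=
  b.foldl (fun d line =>
      if PySem.Str.startswith line "Summary:" then d.insert "summary" (pvFieldB line)
      else if PySem.Str.startswith line "Description:" then d.insert "description" (pvFieldB line)
      else d)
    (PySem.Dict.ofList [("summary", ""), ("description", "")])

def parse_subtasks_regex_py_alt (content : String) : List (List (String × String)) :=
  (pvBlocks ((((PySem.Str.split? content "\n").getD [])).map PySem.Str.strip)).map
    (fun b => (pvParseBlock b).items)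

-- ===== PRECONDITION & SPEC =====
def Spec_parse_subtasks_regex_py (content : String) (out : List (List (String × String))) : Prop := out = parse_subtasks_regex_py_alt content
instance (content : String) (out : List (List (String × String))) : Decidable (Spec_parse_subtasks_regex_py content out) := by unfold Spec_parse_subtasks_regex_py; infer_instance

-- ===== CLAIM (what is proved, stated in full; the proofs are below) =====
def Claim_equal_parse_subtasks_regex_py : Prop := ∀ (content : String), Dom_parse_subtasks_regex_py content → Spec_parse_subtasks_regex_py content (parse_subtasks_regex_py content)

-- ===== LEMMAS AND PROOFS =====

-- B's per-line dict update (the body of pvParseBlock's fold), to state the invariant from an arbitrary starting dict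
def pvUpd (d : PySem.Dict String String) (line : String) : PySem.Dict String String :=
  if PySem.Str.startswith line "Summary:" then d.insert "summary" (pvFieldB line)
  else if PySem.Str.startswith line "Description:" then d.insert "description" (pvFieldB line)
  else d

def pvInit : PySem.Dict String String := PySem.Dict.ofList [("summary", ""), ("description", "")]

def pvFlush (r : List (PySem.Dict String String) × Option (PySem.Dict String String)) :
    List (PySem.Dict String String) :=
  match r.2 with
  | some d => r.1 ++ [d]
  | none => r.1

lemma pvParseBlock_eq (b : List String) : pvParseBlock b = b.foldl pvUpd pvInit := rfl

lemma pvBlocks_nil : pvBlocks [] = [] := by rw [pvBlocks]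

lemma pvBlocks_cons_marker {l : String} (ls : List String) (h : pvIsMarker l = true) :
    pvBlocks (l :: ls) =
      (ls.takeWhile (fun x => !pvIsMarker x)) :: pvBlocks (ls.dropWhile (fun x => !pvIsMarker x)) := by
  rw [pvBlocks]; simp [h]

lemma pvBlocks_cons_not {l : String} (ls : List String) (h : pvIsMarker l = false) :
    pvBlocks (l :: ls) = pvBlocks ls := by
  rw [pvBlocks]; simp [h]

lemma pvStepA_eq (st : List (PySem.Dict String String) × Option (PySem.Dict String String))
    (l : String) :
    pvStepA st l =
      if pvIsMarker (PySem.Str.strip l) then (st.1 ++ st.2.toList, some pvInit)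
      else
        match st.2 with
        | some d => (st.1, some (pvUpd d (PySem.Str.strip l)))
        | none => st := by
  obtain ⟨subs, cur⟩ := st
  cases cur <;>
    simp [pvStepA, pvUpd, pvInit, pvIsMarker, pvFieldA, pvFieldB, PySem.Dict.ofList] <;>
    split_ifs <;> rfl

-- main invariant: flushing A's fold from (subs, cur) over ls equals subs ++ B's block-parsed tail
lemma pvMain (ls : List String) :
    ∀ (subs : List (PySem.Dict String String)) (cur : Option (PySem.Dict String String)),
    pvFlush (ls.foldl pvStepA (subs, cur)) =
      subs ++ (match cur with
        | none => (pvBlocks (ls.map PySem.Str.strip)).map pvParseBlock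
        | some d =>
            (((ls.map PySem.Str.strip).takeWhile (fun x => !pvIsMarker x)).foldl pvUpd d) ::
              (pvBlocks ((ls.map PySem.Str.strip).dropWhile (fun x => !pvIsMarker x))).map pvParseBlock) := by
  induction ls with
  | nil =>
    intro subs cur
    cases cur with
    | none => simp [pvFlush, pvBlocks_nil]
    | some d => simp [pvFlush, pvBlocks_nil]
  | cons l ls ih =>
    intro subs cur
    simp only [List.foldl_cons, List.map_cons, pvStepA_eq]
    by_cases hm : pvIsMarker (PySem.Str.strip l) = true
    · rw [if_pos hm]
      cases cur with
      | none =>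
        rw [ih, pvBlocks_cons_marker _ hm]
        simp [pvParseBlock_eq]
      | some d =>
        rw [ih]
        simp [hm, pvBlocks_cons_marker (List.map PySem.Str.strip ls) hm, pvParseBlock_eq]
    · rw [if_neg hm]
      rw [Bool.not_eq_true] at hm
      cases cur with
      | none =>
        rw [ih, pvBlocks_cons_not _ hm]
      | some d =>
        rw [ih]
        simp [hm]

-- ===== VERDICT (by name: the statement is the Claim_ definition above) =====
theorem parse_subtasks_regex_py_spec : Claim_equal_parse_subtasks_regex_py := by
  intro content _
  unfold Spec_parse_subtasks_regex_py parse_subtasks_regex_py parse_subtasks_regex_py_alt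
  show ((pvFlush (((PySem.Str.split? content "\n").getD []).foldl pvStepA ([], none))).map
      (fun d => PySem.Dict.items d)) = _
  rw [pvMain]
  simp
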